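-- pv_equiv track=rewrite | github.com/beatrizalbiac/Ing-Datos | exercise2/tab_processor/lyrics/main.py | is_chord_spanish
-- ===== SOURCE A (Python) =====
-- spanish_chords = {"do", "re", "mi", "fa", "sol", "la", "si"}
--
-- def is_chord_spanish(frag: str) -> bool:
--     t = frag.strip().lower()
--     if not t:
--         return False
--
--     for root in spanish_chords:
--         if t.startswith(root):
--             rest = t[len(root):]
--             allowed_after = set("#b0123456789mM/+()")
--             if all(c in allowed_after for c in rest):
--                 return True
--
--     return False
-- ===== SOURCE B (Python) =====
-- def is_chord_spanish(frag: str) -> bool: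
--     t = frag.strip().lower()
--     root = t[:3] if t.startswith("sol") else t[:2]
--     if root not in ("do", "re", "mi", "fa", "sol", "la", "si"):
--         return False
--     return not t[len(root):].strip("#b0123456789mM/+()")
-- ===== Notes on version B (the rewrite author's own statement) =====
-- stated objective: simpler
-- what changed: The per-root loop with an inner per-character set-membership scan is replaced by direct root extraction via slicing (three chars iff the string starts with 'sol', else two) plus tuple membership, and the trailing-characters check by str.strip over the allowed characters tested for emptiness.
import Mathlib
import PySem

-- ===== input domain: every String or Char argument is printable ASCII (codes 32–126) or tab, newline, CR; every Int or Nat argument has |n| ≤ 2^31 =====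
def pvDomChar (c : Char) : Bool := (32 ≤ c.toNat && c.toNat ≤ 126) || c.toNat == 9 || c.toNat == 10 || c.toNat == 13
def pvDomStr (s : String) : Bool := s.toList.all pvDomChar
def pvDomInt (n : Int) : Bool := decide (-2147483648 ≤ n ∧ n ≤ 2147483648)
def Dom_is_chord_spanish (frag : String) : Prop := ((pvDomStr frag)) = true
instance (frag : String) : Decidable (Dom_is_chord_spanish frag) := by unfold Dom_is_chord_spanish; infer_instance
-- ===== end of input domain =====

-- B replaces A's per-root loop and per-character set scan by direct root extraction via
-- slicing plus tuple membership and a strip-to-empty check (objective: simpler; same cost).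

-- ===== PORT A =====
-- A iterates over a Python set of roots; no root is a prefix of another, so at most one
-- root can pass the startswith test and a fixed iteration order is faithful on every input.
def pvRootsA : List (List Char) :=
  ["do".toList, "re".toList, "mi".toList, "fa".toList, "sol".toList, "la".toList, "si".toList]
def pvAllowedAfter : PySem.Set Char := PySem.Set.ofList ("#b0123456789mM/+()".toList)
def pvLoopA (t : List Char) : List (List Char) → Bool
  | [] => false
  | root :: rs =>
    if PySem.Chars.startswith t root then
      let rest := PySem.Chars.slice t (some (root.length : Int)) none
      if rest.all (fun c => pvAllowedAfter.contains c) then true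
      else pvLoopA t rs
    else pvLoopA t rs

def is_chord_spanish (frag : String) : Bool :=
  let t := PySem.Chars.lower (PySem.Chars.strip frag.toList)
  if t.isEmpty then false
  else pvLoopA t pvRootsA

-- ===== PORT B =====
def pvAllowedChars : List Char := "#b0123456789mM/+()".toList

def is_chord_spanish_alt (frag : String) : Bool :=
  let t := PySem.Chars.lower (PySem.Chars.strip frag.toList)
  let root := if PySem.Chars.startswith t "sol".toList
              then PySem.Chars.slice t none (some 3)
              else PySem.Chars.slice t none (some 2)
  if !(["do".toList, "re".toList, "mi".toList, "fa".toList, "sol".toList, "la".toList,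
        "si".toList].contains root) then false
  else (PySem.Chars.stripChars (PySem.Chars.slice t (some (root.length : Int)) none) pvAllowedChars).isEmpty

-- ===== PRECONDITION & SPEC =====
def Spec_is_chord_spanish (frag : String) (out : Bool) : Prop := out = is_chord_spanish_alt frag
instance (frag : String) (out : Bool) : Decidable (Spec_is_chord_spanish frag out) := by unfold Spec_is_chord_spanish; infer_instance

-- ===== CLAIM =====
def Claim_equal_is_chord_spanish : Prop := ∀ (frag : String), Dom_is_chord_spanish frag → Spec_is_chord_spanish frag (is_chord_spanish frag)

-- ===== LEMMAS AND PROOFS =====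

lemma stripChars_isEmpty (cs chars : List Char) :
    (PySem.Chars.stripChars cs chars).isEmpty = cs.all (fun c => chars.contains c) := by
  unfold PySem.Chars.stripChars
  rw [Bool.eq_iff_iff]
  simp only [List.isEmpty_iff, List.reverse_eq_nil_iff, List.dropWhile_eq_nil_iff,
    List.mem_reverse, List.all_eq_true]
  constructor
  · intro h c hc
    rcases List.mem_append.mp ((List.takeWhile_append_dropWhile (p := fun c => chars.contains c) (l := cs)) ▸ hc) with h1 | h2
    · exact List.mem_takeWhile_imp h1
    · exact h c h2
  · intro h c hc
    exact h c ((List.dropWhile_sublist _).mem hc)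

lemma decide_all_mem (u S : List Char) :
    decide (∀ x ∈ u, x ∈ S) = u.all fun c => decide (c ∈ S) := by
  induction u with
  | nil => simp
  | cons a l ih => simp [List.all_cons, ← ih]

lemma loopA_cons (t r : List Char) (rs : List (List Char)) :
    pvLoopA t (r :: rs) =
      ((PySem.Chars.startswith t r &&
        (PySem.Chars.slice t (some (r.length : Int)) none).all (fun c => pvAllowedAfter.contains c)) ||
       pvLoopA t rs) := by
  simp only [pvLoopA]
  by_cases h1 : PySem.Chars.startswith t r <;>
    by_cases h2 : (PySem.Chars.slice t (some (r.length : Int)) none).all (fun c => pvAllowedAfter.contains c) <;>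
    simp [h1, h2, decide_all_mem]

lemma loopA_nil (t : List Char) : pvLoopA t [] = false := rfl

lemma allowed_mem (c : Char) : (decide (c ∈ pvAllowedAfter)) = pvAllowedChars.contains c := by
  have h : pvAllowedAfter = pvAllowedChars := by decide
  rw [h, Bool.eq_iff_iff]
  simp [pvAllowedChars]

lemma slice_to3 (a b c : Char) (u : List Char) :
    PySem.List.slice (a::b::c::u) none (some 3) = [a,b,c] := by
  simp [PySem.List.slice_to _ (by norm_num : (0:Int) ≤ 3)]
lemma slice_to2 (a b : Char) (u : List Char) :
    PySem.List.slice (a::b::u) none (some 2) = [a,b] := by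
  simp [PySem.List.slice_to _ (by norm_num : (0:Int) ≤ 2)]
lemma slice_to2_one (a : Char) : PySem.List.slice [a] none (some 2) = [a] := by
  simp [PySem.List.slice_to _ (by norm_num : (0:Int) ≤ 2)]
lemma slice_to2_nil : PySem.List.slice ([] : List Char) none (some 2) = [] := by
  simp [PySem.List.slice_to _ (by norm_num : (0:Int) ≤ 2)]
lemma slice_from_nat (xs : List Char) (k : Nat) :
    PySem.List.slice xs (some (k:Int)) none = xs.drop k := by
  simp [PySem.List.slice_from _ (Int.natCast_nonneg k)]

set_option maxHeartbeats 1000000 in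
lemma body_eq (t : List Char) :
    (if t.isEmpty then false else pvLoopA t pvRootsA) =
      (let root := if PySem.Chars.startswith t "sol".toList
                   then PySem.Chars.slice t none (some 3)
                   else PySem.Chars.slice t none (some 2)
       if !(["do".toList, "re".toList, "mi".toList, "fa".toList, "sol".toList, "la".toList,
        "si".toList].contains root) then false
       else (PySem.Chars.stripChars (PySem.Chars.slice t (some (root.length : Int)) none) pvAllowedChars).isEmpty) := by
  by_cases hsol : PySem.Chars.startswith t "sol".toList
  · obtain ⟨u, rfl⟩ : ∃ u, t = 's' :: 'o' :: 'l' :: u := by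
      obtain ⟨u, hu⟩ := (PySem.Chars.startswith_iff _ _).mp hsol
      exact ⟨u, by simpa using hu.symm⟩
    simp only [hsol, if_true, pvRootsA, loopA_cons, pvLoopA,
      PySem.Chars.slice_eq_listSlice, slice_to3, slice_from_nat]
    simp [PySem.Chars.startswith, List.isPrefixOf, stripChars_isEmpty, allowed_mem,
      decide_all_mem]
  · simp only [hsol, if_false, Bool.false_eq_true]
    match t with
    | [] =>
      simp [pvLoopA, slice_to2_nil]
    | [a] =>
      simp only [pvRootsA, loopA_cons, pvLoopA,
        PySem.Chars.slice_eq_listSlice, slice_to2_one]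
      simp [PySem.Chars.startswith, List.isPrefixOf]
    | a :: b :: u =>
      have hsol' : ¬ ('s' = a ∧ 'o' = b ∧ List.IsPrefix ['l'] u) := by
        rintro ⟨rfl, rfl, v, rfl⟩
        exact hsol ((PySem.Chars.startswith_iff _ _).mpr ⟨v, by simp⟩)
      simp only [pvRootsA, loopA_cons, loopA_nil,
        PySem.Chars.slice_eq_listSlice, slice_to2, slice_from_nat]
      by_cases e1 : 'd' = a ∧ 'o' = b
      · obtain ⟨rfl, rfl⟩ := e1
        simp [PySem.Chars.startswith, List.isPrefixOf, stripChars_isEmpty, allowed_mem]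
      by_cases e2 : 'r' = a ∧ 'e' = b
      · obtain ⟨rfl, rfl⟩ := e2
        simp [PySem.Chars.startswith, List.isPrefixOf, stripChars_isEmpty, allowed_mem]
      by_cases e3 : 'm' = a ∧ 'i' = b
      · obtain ⟨rfl, rfl⟩ := e3
        simp [PySem.Chars.startswith, List.isPrefixOf, stripChars_isEmpty, allowed_mem]
      by_cases e4 : 'f' = a ∧ 'a' = b
      · obtain ⟨rfl, rfl⟩ := e4
        simp [PySem.Chars.startswith, List.isPrefixOf, stripChars_isEmpty, allowed_mem]
      by_cases e5 : 'l' = a ∧ 'a' = b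
      · obtain ⟨rfl, rfl⟩ := e5
        simp [PySem.Chars.startswith, List.isPrefixOf, stripChars_isEmpty, allowed_mem]
      by_cases e6 : 's' = a ∧ 'i' = b
      · obtain ⟨rfl, rfl⟩ := e6
        simp [PySem.Chars.startswith, List.isPrefixOf, stripChars_isEmpty, allowed_mem]
      by_cases e7 : 's' = a ∧ 'o' = b
      · obtain ⟨rfl, rfl⟩ := e7
        have hl : ¬ List.IsPrefix ['l'] u := fun hp => hsol' ⟨rfl, rfl, hp⟩
        simp [PySem.Chars.startswith, List.isPrefixOf, allowed_mem,
          List.isPrefixOf_iff_prefix, hl]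
      · have e1' : ¬(a = 'd' ∧ b = 'o') := fun ⟨x, y⟩ => e1 ⟨x.symm, y.symm⟩
        have e2' : ¬(a = 'r' ∧ b = 'e') := fun ⟨x, y⟩ => e2 ⟨x.symm, y.symm⟩
        have e3' : ¬(a = 'm' ∧ b = 'i') := fun ⟨x, y⟩ => e3 ⟨x.symm, y.symm⟩
        have e4' : ¬(a = 'f' ∧ b = 'a') := fun ⟨x, y⟩ => e4 ⟨x.symm, y.symm⟩
        have e5' : ¬(a = 'l' ∧ b = 'a') := fun ⟨x, y⟩ => e5 ⟨x.symm, y.symm⟩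
        have e6' : ¬(a = 's' ∧ b = 'i') := fun ⟨x, y⟩ => e6 ⟨x.symm, y.symm⟩
        have fdo : PySem.Chars.startswith (a :: b :: u) ['d', 'o'] = false := by
          simp [PySem.Chars.startswith, List.isPrefixOf]
          exact fun h1 h2 => e1 ⟨h1, h2⟩
        have fre : PySem.Chars.startswith (a :: b :: u) ['r', 'e'] = false := by
          simp [PySem.Chars.startswith, List.isPrefixOf]
          exact fun h1 h2 => e2 ⟨h1, h2⟩
        have fmi : PySem.Chars.startswith (a :: b :: u) ['m', 'i'] = false := by
          simp [PySem.Chars.startswith, List.isPrefixOf]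
          exact fun h1 h2 => e3 ⟨h1, h2⟩
        have ffa : PySem.Chars.startswith (a :: b :: u) ['f', 'a'] = false := by
          simp [PySem.Chars.startswith, List.isPrefixOf]
          exact fun h1 h2 => e4 ⟨h1, h2⟩
        have fla : PySem.Chars.startswith (a :: b :: u) ['l', 'a'] = false := by
          simp [PySem.Chars.startswith, List.isPrefixOf]
          exact fun h1 h2 => e5 ⟨h1, h2⟩
        have fsi : PySem.Chars.startswith (a :: b :: u) ['s', 'i'] = false := by
          simp [PySem.Chars.startswith, List.isPrefixOf]
          exact fun h1 h2 => e6 ⟨h1, h2⟩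
        have fsol : PySem.Chars.startswith (a :: b :: u) ['s', 'o', 'l'] = false :=
          Bool.eq_false_iff.mpr hsol
        simp [fdo, fre, fmi, ffa, fla, fsi, fsol]
        rintro (h | h | h | h | h | h)
        · exact absurd h e1'
        · exact absurd h e2'
        · exact absurd h e3'
        · exact absurd h e4'
        · exact absurd h e5'
        · exact absurd h e6'

-- ===== VERDICT =====
theorem is_chord_spanish_spec : Claim_equal_is_chord_spanish := by
  intro frag _
  unfold Spec_is_chord_spanish is_chord_spanish is_chord_spanish_alt
  exact body_eq _
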